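-- pv_equiv track=rewrite | github.com/AlessioMichelassi/biggusPy1.3.1 | scratchONodeV0_9/ArguePy_CodeEditor/editorWidgetTool/tools/SintaxHighlighters/pyHighLighter.py | find_triple_quotes
-- ===== SOURCE A (Python) =====
-- def find_triple_quotes(text):
--     """
--     Trova le posizioni di inizio event fine dei commenti multilinea
--     :param text:
--     :return: una lista di tuple contenenti l'inizio event la fine dei commenti multilinea
--     """
--     positions = []
--     start = None
--     inside_triple_quoted = False
--     for i in range(len(text)):
--         if text[i:i + 3] in ('"""', "'''"):
--             if inside_triple_quoted:
--                 positions.append((start, i + 3))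
--                 inside_triple_quoted = False
--             else:
--                 start = i
--                 inside_triple_quoted = True
--     if inside_triple_quoted:
--         positions.append((start, len(text)))
--     return positions
-- ===== SOURCE B (Python) =====
-- def find_triple_quotes(text):
--     n = len(text)
--     marks = [i for i in range(n) if text[i:i + 3] in ('"""', "'''")]
--     positions = []
--     j = 0
--     while j + 1 < len(marks):
--         positions.append((marks[j], marks[j + 1] + 3))
--         j += 2
--     if len(marks) % 2 == 1:
--         positions.append((marks[-1], n))
--     return positions
-- ===== Notes on version B (the rewrite author's own statement) =====
-- stated objective: simpler
-- what changed: Replaces the single stateful toggle loop (start/inside flags) by two stateless passes: first collect all triple-quote marker indices with a comprehension, then pair consecutive markers two at a time (odd leftover closes at len(text)).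
import Mathlib
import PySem

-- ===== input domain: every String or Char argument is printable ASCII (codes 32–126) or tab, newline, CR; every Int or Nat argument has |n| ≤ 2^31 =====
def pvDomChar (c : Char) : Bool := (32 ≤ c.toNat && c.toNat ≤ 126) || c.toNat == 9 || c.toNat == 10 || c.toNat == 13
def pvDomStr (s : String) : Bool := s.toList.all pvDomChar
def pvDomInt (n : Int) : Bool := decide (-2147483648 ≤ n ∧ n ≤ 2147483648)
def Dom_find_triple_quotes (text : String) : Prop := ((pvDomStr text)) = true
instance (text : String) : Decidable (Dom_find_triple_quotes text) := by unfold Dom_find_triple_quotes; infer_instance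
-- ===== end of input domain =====

-- B replaces A's stateful toggle loop by two stateless passes (collect markers, then pair them); simpler decomposition, same O(n) cost.

-- ===== PORT A =====
-- shared by both ports: the overlapping 3-char window test  text[i:i+3] in ('"""', "'''")
def pvIsMark (cs : List Char) (i : Int) : Bool :=
  PySem.List.slice cs (some i) (some (i + 3)) = ['"', '"', '"'] ||
  PySem.List.slice cs (some i) (some (i + 3)) = ['\'', '\'', '\'']

-- one loop body of A: toggle inside_triple_quoted, recording start / appending (start, i+3).
-- start is Option Int (Python's None); it is only read (getD 0) when inside_triple_quoted, where it is always set — exact.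
def pvStepA (cs : List Char) (s : List (Int × Int) × Option Int × Bool) (i : Int) :
    List (Int × Int) × Option Int × Bool :=
  if pvIsMark cs i then
    if s.2.2 then (s.1 ++ [(s.2.1.getD 0, i + 3)], s.2.1, false)
    else (s.1, some i, true)
  else s

def find_triple_quotes (text : String) : List (Int × Int) :=
  let cs := text.toList
  let n : Int := cs.length
  let st := (PySem.List.pyRange 0 n 1).foldl (pvStepA cs) ([], none, false)
  if st.2.2 then st.1 ++ [(st.2.1.getD 0, n)] else st.1

-- ===== PORT B =====
-- the while-loop of Source B: consume the marker list two at a time; odd leftover closes at n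
def pvPair (n : Int) : List Int → List (Int × Int)
  | a :: b :: rest => (a, b + 3) :: pvPair n rest
  | [a] => [(a, n)]
  | [] => []

def find_triple_quotes_alt (text : String) : List (Int × Int) :=
  let cs := text.toList
  let n : Int := cs.length
  let marks := (PySem.List.pyRange 0 n 1).filter (pvIsMark cs)
  pvPair n marks

-- ===== PRECONDITION & SPEC =====
def Spec_find_triple_quotes (text : String) (out : List (Int × Int)) : Prop := out = find_triple_quotes_alt text
instance (text : String) (out : List (Int × Int)) : Decidable (Spec_find_triple_quotes text out) := by unfold Spec_find_triple_quotes; infer_instance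

-- ===== CLAIM (what is proved, stated in full; the proofs are below) =====
def Claim_equal_find_triple_quotes : Prop := ∀ (text : String), Dom_find_triple_quotes text → Spec_find_triple_quotes text (find_triple_quotes text)

-- ===== LEMMAS AND PROOFS =====
-- A's trailing "if inside_triple_quoted: append (start, len(text))" as a function of the final state
def pvFin (n : Int) (s : List (Int × Int) × Option Int × Bool) : List (Int × Int) :=
  if s.2.2 then s.1 ++ [(s.2.1.getD 0, n)] else s.1

-- A's loop body restricted to marker indices (the outer 'if' stripped)
def pvToggle (s : List (Int × Int) × Option Int × Bool) (i : Int) :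
    List (Int × Int) × Option Int × Bool :=
  if s.2.2 then (s.1 ++ [(s.2.1.getD 0, i + 3)], s.2.1, false)
  else (s.1, some i, true)

theorem foldl_stepA_eq_toggle_filter (cs : List Char) (l : List Int)
    (s : List (Int × Int) × Option Int × Bool) :
    l.foldl (pvStepA cs) s = (l.filter (pvIsMark cs)).foldl pvToggle s := by
  induction l generalizing s with
  | nil => rfl
  | cons a l ih =>
    by_cases h : pvIsMark cs a = true <;>
      simp [List.foldl_cons, h, pvStepA, pvToggle, ih]

theorem fin_toggle_eq_pair (n : Int) (ms : List Int) :
    ∀ (ps : List (Int × Int)) (st : Option Int),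
      pvFin n (ms.foldl pvToggle (ps, st, false)) = ps ++ pvPair n ms := by
  induction ms using pvPair.induct with
  | case1 a b rest ih =>
    intro ps st
    simp only [List.foldl_cons, pvToggle]
    simpa [pvPair] using ih (ps ++ [(a, b + 3)]) (some a)
  | case2 a => intro ps st; simp [pvToggle, pvFin, pvPair]
  | case3 => intro ps st; simp [pvFin, pvPair]

-- ===== VERDICT (by name: the statement is the Claim_ definition above) =====
theorem find_triple_quotes_spec : Claim_equal_find_triple_quotes := by
  intro text _
  show find_triple_quotes text = find_triple_quotes_alt text
  simp only [find_triple_quotes, find_triple_quotes_alt, foldl_stepA_eq_toggle_filter]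
  have h := fin_toggle_eq_pair (text.toList.length : Int)
    ((PySem.List.pyRange 0 (text.toList.length : Int) 1).filter (pvIsMark text.toList)) [] none
  simpa [pvFin] using h
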